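-- pv_equiv track=rewrite | github.com/Bridgit-SPC/brc333-jaguar | metaweb/jaguar/groupColorsByPart.py | aggregate_colors
-- ===== SOURCE A (Python) =====
-- def aggregate_colors(part_coords, color_coords):
--     aggregated_data = {}
--
--     for part, part_coord in part_coords.items():
--         part_data = {}
--
--         for color, color_coord in color_coords.items():
--             common_coords = [coord for coord in part_coord if coord in color_coord]
--
--             if common_coords:
--                 part_data[color] = common_coords
--
--         if part_data:
--             aggregated_data[part] = part_data
--
--     return aggregated_data
-- ===== SOURCE B (Python) =====
-- def aggregate_colors(part_coords, color_coords):
--     # Build an inverted index coord -> list of colors (deduped, first-seen order),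
--     # then distribute each part's coords through the index in one forward pass.
--     index = {}
--     for color, color_coord in color_coords.items():
--         for coord in color_coord:
--             bucket = index.setdefault(coord, [])
--             if color not in bucket:
--                 bucket.append(color)
--
--     aggregated_data = {}
--     for part, part_coord in part_coords.items():
--         common = {}
--         for coord in part_coord:
--             for color in index.get(coord, ()):
--                 common[color] = common.get(color, []) + [coord]
--         part_data = {color: common[color] for color in color_coords if color in common}
--         if part_data:
--             aggregated_data[part] = part_data
--     return aggregated_data
-- ===== Notes on version B (the rewrite author's own statement) =====
-- stated objective: faster
-- what changed: Replaces A's nested per-(part,color) rescan of both coordinate lists by an inverted index coord->colors built once over color_coords, then a single distributing pass over each part's coords.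
import Mathlib
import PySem

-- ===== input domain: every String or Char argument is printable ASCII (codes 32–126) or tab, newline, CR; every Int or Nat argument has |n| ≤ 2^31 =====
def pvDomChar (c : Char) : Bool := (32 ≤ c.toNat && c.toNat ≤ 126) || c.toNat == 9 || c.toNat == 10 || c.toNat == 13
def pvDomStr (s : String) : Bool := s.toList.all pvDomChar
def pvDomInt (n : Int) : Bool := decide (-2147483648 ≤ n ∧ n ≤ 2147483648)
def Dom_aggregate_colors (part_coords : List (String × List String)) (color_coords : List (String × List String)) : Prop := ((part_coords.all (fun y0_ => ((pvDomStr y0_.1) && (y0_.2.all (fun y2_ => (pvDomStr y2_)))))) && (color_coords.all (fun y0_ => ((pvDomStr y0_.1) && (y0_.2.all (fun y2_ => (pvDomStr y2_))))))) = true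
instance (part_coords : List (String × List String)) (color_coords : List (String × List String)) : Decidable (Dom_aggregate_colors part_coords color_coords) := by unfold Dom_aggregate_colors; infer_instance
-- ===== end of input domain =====

-- B replaces A's per-(part,color) rescan of the coordinate lists by an inverted index
-- coord -> colors built once, plus one distributing pass per part (objective: faster).

-- ===== PORT A =====
def aggregate_colors (part_coords : List (String × List String)) (color_coords : List (String × List String)) : List (String × List (String × List String)) :=
  (part_coords.foldl (fun aggregated_data pp =>
      let part_data : PySem.Dict String (List String) :=
        color_coords.foldl (fun part_data cp =>
          let common_coords := pp.2.filter (fun coord => cp.2.contains coord)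
          if common_coords ≠ [] then part_data.insert cp.1 common_coords else part_data)
          PySem.Dict.empty
      if part_data.items ≠ [] then aggregated_data.insert pp.1 part_data.items else aggregated_data)
    (PySem.Dict.empty : PySem.Dict String (List (String × List String)))).items

-- ===== PORT B =====
def aggregate_colors_alt (part_coords : List (String × List String)) (color_coords : List (String × List String)) : List (String × List (String × List String)) :=
  let index : PySem.Dict String (PySem.Set String) :=
    color_coords.foldl (fun index cp =>
      cp.2.foldl (fun index coord =>
        index.insert coord (PySem.Set.add (index.getD coord PySem.Set.empty) cp.1)) index)
      PySem.Dict.empty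
  (part_coords.foldl (fun aggregated_data pp =>
      let common : PySem.Dict String (List String) :=
        pp.2.foldl (fun common coord =>
          (index.getD coord PySem.Set.empty).foldl (fun common color =>
            common.modify color [] (· ++ [coord])) common)
          PySem.Dict.empty
      let part_data : PySem.Dict String (List String) :=
        (color_coords.map Prod.fst).foldl (fun part_data color =>
          match common.get? color with
          | some l => part_data.insert color l
          | none => part_data)
          PySem.Dict.empty
      if part_data.items ≠ [] then aggregated_data.insert pp.1 part_data.items else aggregated_data)
    (PySem.Dict.empty : PySem.Dict String (List (String × List String)))).items

-- ===== PRECONDITION & SPEC =====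
-- Pre_ excludes association lists whose color keys repeat: duplicate keys cannot arise from a
-- Python dict argument, and on such lists A keeps only the last duplicate entry's coords while
-- B merges all entries for the key.
def Pre_aggregate_colors (part_coords : List (String × List String)) (color_coords : List (String × List String)) : Prop :=
  (color_coords.map Prod.fst).Nodup
instance (part_coords : List (String × List String)) (color_coords : List (String × List String)) : Decidable (Pre_aggregate_colors part_coords color_coords) := by unfold Pre_aggregate_colors; infer_instance
def pvWitness_aggregate_colors : (List (String × List String)) × (List (String × List String)) :=
  ([("head", ["1", "2"]), ("tail", ["2", "3"])], [("red", ["2"]), ("blue", ["3", "9"])])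

def Spec_aggregate_colors (part_coords : List (String × List String)) (color_coords : List (String × List String)) (out : List (String × List (String × List String))) : Prop := out = aggregate_colors_alt part_coords color_coords
instance (part_coords : List (String × List String)) (color_coords : List (String × List String)) (out : List (String × List (String × List String))) : Decidable (Spec_aggregate_colors part_coords color_coords out) := by unfold Spec_aggregate_colors; infer_instance

-- ===== CLAIM (what is proved, stated in full; the proofs are below) =====
def Claim_equal_aggregate_colors : Prop := ∀ (part_coords : List (String × List String)) (color_coords : List (String × List String)), Dom_aggregate_colors part_coords color_coords → Pre_aggregate_colors part_coords color_coords → Spec_aggregate_colors part_coords color_coords (aggregate_colors part_coords color_coords)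

-- ===== LEMMAS AND PROOFS =====

-- inner index fold over one color's coord list
lemma idx_inner_getD (cc : List String) (c : String) (d : PySem.Dict String (PySem.Set String)) (coord : String) :
    ((cc.foldl (fun d coord => d.insert coord ((d.getD coord PySem.Set.empty).add c)) d).getD coord PySem.Set.empty)
      = if coord ∈ cc then (d.getD coord PySem.Set.empty).add c else d.getD coord PySem.Set.empty := by
  induction cc generalizing d with
  | nil => simp
  | cons x rest ih =>
    simp only [List.foldl_cons, ih, PySem.Dict.getD_insert]
    by_cases hx : coord = x <;> by_cases hr : coord ∈ rest <;>
      simp [hx, hr, List.mem_cons]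

lemma idx_mem (cs : List (String × List String)) (d : PySem.Dict String (PySem.Set String)) (coord color : String) :
    color ∈ ((cs.foldl (fun index cp =>
        cp.2.foldl (fun index coord => index.insert coord ((index.getD coord PySem.Set.empty).add cp.1)) index) d).getD coord PySem.Set.empty)
      ↔ color ∈ d.getD coord PySem.Set.empty ∨ ∃ cc, (color, cc) ∈ cs ∧ coord ∈ cc := by
  induction cs generalizing d with
  | nil => simp
  | cons cp rest ih =>
    simp only [List.foldl_cons, ih, idx_inner_getD]
    by_cases hc : coord ∈ cp.2
    · simp only [hc, if_pos, PySem.Set.mem_add, List.mem_cons]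
      constructor
      · rintro ((h | h) | ⟨cc, hcc, hco⟩)
        · exact Or.inl h
        · exact Or.inr ⟨cp.2, Or.inl (by simp [h]), hc⟩
        · exact Or.inr ⟨cc, Or.inr hcc, hco⟩
      · rintro (h | ⟨cc, (hcc | hcc), hco⟩)
        · exact Or.inl (Or.inl h)
        · exact Or.inl (Or.inr (by rw [← hcc]))
        · exact Or.inr ⟨cc, hcc, hco⟩
    · simp only [hc, if_neg, List.mem_cons, not_false_iff]
      constructor
      · rintro (h | ⟨cc, hcc, hco⟩)
        · exact Or.inl h
        · exact Or.inr ⟨cc, Or.inr hcc, hco⟩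
      · rintro (h | ⟨cc, (hcc | hcc), hco⟩)
        · exact Or.inl h
        · exact absurd hco (by subst hcc; simpa using hc)
        · exact Or.inr ⟨cc, hcc, hco⟩

lemma idx_nodup (cs : List (String × List String)) (d : PySem.Dict String (PySem.Set String))
    (h : ∀ coord, (d.getD coord PySem.Set.empty).Nodup) (coord : String) :
    ((cs.foldl (fun index cp =>
        cp.2.foldl (fun index coord => index.insert coord ((index.getD coord PySem.Set.empty).add cp.1)) index) d).getD coord PySem.Set.empty).Nodup := by
  induction cs generalizing d with
  | nil => exact h coord
  | cons cp rest ih =>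
    refine ih _ (fun co => ?_)
    rw [idx_inner_getD]
    split
    · exact PySem.Set.nodup_add _ _ (h co)
    · exact h co

-- distributing one coord through its bucket
lemma cm_inner_getD (b : List String) (hb : b.Nodup) (coord : String) (cm : PySem.Dict String (List String)) (color : String) :
    ((b.foldl (fun cm color => cm.modify color [] (· ++ [coord])) cm).getD color [])
      = cm.getD color [] ++ (if color ∈ b then [coord] else []) := by
  induction b generalizing cm with
  | nil => simp
  | cons x rest ih =>
    rw [List.foldl_cons, ih hb.of_cons, PySem.Dict.getD_modify]
    by_cases hx : color = x
    · have hnr : color ∉ rest := by subst hx; exact (List.nodup_cons.mp hb).1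
      subst hx; simp [hnr]
    · simp [hx, List.mem_cons]

lemma cm_inner_contains (b : List String) (coord : String) (cm : PySem.Dict String (List String)) (color : String) :
    ((b.foldl (fun cm color => cm.modify color [] (· ++ [coord])) cm).contains color)
      = (decide (color ∈ b) || cm.contains color) := by
  induction b generalizing cm with
  | nil => simp
  | cons x rest ih =>
    simp only [List.foldl_cons, ih, PySem.Dict.contains_modify, List.mem_cons]
    by_cases hx : color = x <;> simp [hx, Bool.or_comm, Bool.or_left_comm]

lemma cm_getD (coords : List String) (index : PySem.Dict String (PySem.Set String))
    (hidx : ∀ coord, (index.getD coord PySem.Set.empty).Nodup)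
    (cm : PySem.Dict String (List String)) (color : String) :
    ((coords.foldl (fun cm coord =>
        (index.getD coord PySem.Set.empty).foldl (fun cm color => cm.modify color [] (· ++ [coord])) cm) cm).getD color [])
      = cm.getD color [] ++ coords.filter (fun coord => decide (color ∈ index.getD coord PySem.Set.empty)) := by
  induction coords generalizing cm with
  | nil => simp
  | cons x rest ih =>
    simp only [List.foldl_cons, ih, cm_inner_getD _ (hidx x), List.filter_cons, List.append_assoc]
    split <;> split <;> simp_all

lemma cm_contains (coords : List String) (index : PySem.Dict String (PySem.Set String))
    (cm : PySem.Dict String (List String)) (color : String) :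
    ((coords.foldl (fun cm coord =>
        (index.getD coord PySem.Set.empty).foldl (fun cm color => cm.modify color [] (· ++ [coord])) cm) cm).contains color)
      = (coords.any (fun coord => decide (color ∈ index.getD coord PySem.Set.empty)) || cm.contains color) := by
  induction coords generalizing cm with
  | nil => simp
  | cons x rest ih =>
    simp only [List.foldl_cons, ih, cm_inner_contains, List.any_cons]
    simp [Bool.or_comm, Bool.or_assoc]

-- unique key lookup in a Nodup association list
lemma key_unique {cs : List (String × List String)} (h : (cs.map Prod.fst).Nodup)
    {k : String} {v w : List String} (h1 : (k, v) ∈ cs) (h2 : (k, w) ∈ cs) : v = w := by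
  induction cs with
  | nil => cases h1
  | cons p rest ih =>
    simp only [List.map_cons, List.nodup_cons] at h
    rcases List.mem_cons.mp h1 with h1 | h1 <;> rcases List.mem_cons.mp h2 with h2 | h2
    · rw [← h1] at h2; exact (Prod.mk.injEq _ _ _ _ ▸ h2).2.symm ▸ rfl
    · exfalso; exact h.1 (h1 ▸ (List.mem_map.mpr ⟨(k, w), h2, rfl⟩))
    · exfalso; exact h.1 (h2 ▸ (List.mem_map.mpr ⟨(k, v), h1, rfl⟩))
    · exact ih h.2 h1 h2


-- contained key lookup as a some of getD (glue for the match in B's part_data pass)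
lemma get?_some_of_contains (d : PySem.Dict String (List String)) (k : String)
    (h : d.contains k = true) : d.get? k = some (d.getD k []) := by
  rw [PySem.Dict.contains_eq_isSome_get?] at h
  rcases Option.isSome_iff_exists.mp h with ⟨l, hl⟩
  rw [hl, PySem.Dict.getD_eq_get?_getD, hl]
  rfl

-- per-coord predicate agreement: the inverted index answers exactly A's membership test
lemma bucket_pred (ccs : List (String × List String)) (hpre : (ccs.map Prod.fst).Nodup)
    (cp : String × List String) (hcp : cp ∈ ccs) (coord : String) :
    decide (cp.1 ∈ ((ccs.foldl (fun index cp =>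
        cp.2.foldl (fun index coord => index.insert coord ((index.getD coord PySem.Set.empty).add cp.1)) index)
        PySem.Dict.empty).getD coord PySem.Set.empty)) = cp.2.contains coord := by
  have h : cp.1 ∈ ((ccs.foldl (fun index cp =>
      cp.2.foldl (fun index coord => index.insert coord ((index.getD coord PySem.Set.empty).add cp.1)) index)
      PySem.Dict.empty).getD coord PySem.Set.empty) ↔ ∃ cc, (cp.1, cc) ∈ ccs ∧ coord ∈ cc :=
    (idx_mem ccs PySem.Dict.empty coord cp.1).trans
      (by rw [PySem.Dict.getD_empty]; simp [PySem.Set.empty])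
  cases hb : cp.2.contains coord with
  | false =>
    simp only [decide_eq_false_iff_not, h]
    rintro ⟨cc, hcc, hco⟩
    have hcc2 : cc = cp.2 := key_unique hpre hcc (by simpa using hcp)
    subst hcc2
    exact (by simpa using hb : coord ∉ cp.2) hco
  | true =>
    simp only [decide_eq_true_iff, h]
    exact ⟨cp.2, by simpa using hcp, by simpa [List.contains_iff_mem] using hb⟩

-- A's inner fold over the colors equals B's index-then-distribute computation of part_data
lemma part_data_eq (ccs : List (String × List String)) (hpre : (ccs.map Prod.fst).Nodup) (pc : List String) :
    (ccs.foldl (fun part_data cp =>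
        let common_coords := pc.filter (fun coord => cp.2.contains coord)
        if common_coords ≠ [] then part_data.insert cp.1 common_coords else part_data)
      (PySem.Dict.empty : PySem.Dict String (List String)))
    = ((ccs.map Prod.fst).foldl (fun part_data color =>
        match (pc.foldl (fun common coord =>
            (((ccs.foldl (fun index cp =>
                cp.2.foldl (fun index coord => index.insert coord ((index.getD coord PySem.Set.empty).add cp.1)) index)
              PySem.Dict.empty)).getD coord PySem.Set.empty).foldl
              (fun common color => common.modify color [] (· ++ [coord])) common)
          (PySem.Dict.empty : PySem.Dict String (List String))).get? color with
        | some l => part_data.insert color l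
        | none => part_data)
      (PySem.Dict.empty : PySem.Dict String (List String))) := by
  rw [List.foldl_map]
  apply PySem.List.foldl_congr_mem
  intro pd cp hcp
  set idx := (ccs.foldl (fun index cp =>
      cp.2.foldl (fun index coord => index.insert coord ((index.getD coord PySem.Set.empty).add cp.1)) index)
      PySem.Dict.empty) with hidxdef
  set common := (pc.foldl (fun common coord =>
      ((idx.getD coord PySem.Set.empty).foldl
        (fun common color => common.modify color [] (· ++ [coord])) common))
      (PySem.Dict.empty : PySem.Dict String (List String))) with hcommondef
  have hidx : ∀ coord, (idx.getD coord PySem.Set.empty).Nodup := by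
    rw [hidxdef]
    exact idx_nodup ccs PySem.Dict.empty (fun coord => by simp [PySem.Set.empty])
  have hfil : pc.filter (fun coord => decide (cp.1 ∈ idx.getD coord PySem.Set.empty))
      = pc.filter (fun coord => cp.2.contains coord) := by
    apply List.filter_congr
    intro coord _
    rw [hidxdef]
    exact bucket_pred ccs hpre cp hcp coord
  have hgd : common.getD cp.1 [] = pc.filter (fun coord => cp.2.contains coord) := by
    rw [hcommondef, cm_getD pc idx hidx PySem.Dict.empty cp.1, PySem.Dict.getD_empty, hfil,
      List.nil_append]
  have hct : common.contains cp.1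
      = pc.any (fun coord => decide (cp.1 ∈ idx.getD coord PySem.Set.empty)) := by
    rw [hcommondef, cm_contains pc idx PySem.Dict.empty cp.1, PySem.Dict.contains_empty, Bool.or_false]
  simp only []
  by_cases hA : pc.filter (fun coord => cp.2.contains coord) = []
  · have hnone : common.get? cp.1 = none := by
      rw [PySem.Dict.get?_eq_none_iff_contains, hct, List.any_eq_false]
      intro coord hco
      rw [hidxdef, bucket_pred ccs hpre cp hcp coord]
      rw [List.filter_eq_nil_iff] at hA
      exact hA coord hco
    rw [hnone, if_neg (by simp only [ne_eq, not_not]; exact hA)]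
  · have hsome : common.get? cp.1 = some (pc.filter (fun coord => cp.2.contains coord)) := by
      rw [← hgd]
      apply get?_some_of_contains
      rw [hct, List.any_eq_true]
      rcases List.exists_mem_of_ne_nil _ hA with ⟨coord, hco⟩
      rw [List.mem_filter] at hco
      exact ⟨coord, hco.1, by rw [hidxdef, bucket_pred ccs hpre cp hcp coord]; exact hco.2⟩
    rw [hsome, if_pos hA]

-- ===== VERDICT (by name: the statement is the Claim_ definition above) =====
theorem aggregate_colors_spec : Claim_equal_aggregate_colors := by
  intro part_coords color_coords _hdom hpre
  unfold Spec_aggregate_colors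
  unfold Pre_aggregate_colors at hpre
  simp only [aggregate_colors, aggregate_colors_alt]
  congr 1
  apply PySem.List.foldl_congr_mem
  intro acc pp _hpp
  rw [part_data_eq color_coords hpre pp.2]
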